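-- pv_equiv track=rewrite | github.com/Wulfic/Cicada3301 | tools/archive/page52_focus.py | read_in_columns
-- ===== SOURCE A (Python) =====
-- import math
--
-- def read_in_columns(text, cols):
--     """Read text column by column instead of row by row"""
--     rows = math.ceil(len(text) / cols)
--     padded = text + ' ' * (rows * cols - len(text))
--
--     result = []
--     for col in range(cols):
--         for row in range(rows):
--             idx = row * cols + col
--             if idx < len(text):
--                 result.append(text[idx])
--     return ''.join(result)
-- ===== SOURCE B (Python) =====
-- def read_in_columns(text, cols):
--     """Read text column by column instead of row by row"""
--     return ''.join(text[c::cols] for c in range(cols))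
-- ===== Notes on version B (the rewrite author's own statement) =====
-- stated objective: faster
-- what changed: Replaces the nested row/column index loops (idx = row*cols+col with an explicit per-index bounds check) by a single join of strided slices text[c::cols], one per column; constant-factor speedup because the per-character Python-level loop body disappears into C-level slicing. Pre_ only excludes cols == 0, where A raises ZeroDivisionError.
import Mathlib
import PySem

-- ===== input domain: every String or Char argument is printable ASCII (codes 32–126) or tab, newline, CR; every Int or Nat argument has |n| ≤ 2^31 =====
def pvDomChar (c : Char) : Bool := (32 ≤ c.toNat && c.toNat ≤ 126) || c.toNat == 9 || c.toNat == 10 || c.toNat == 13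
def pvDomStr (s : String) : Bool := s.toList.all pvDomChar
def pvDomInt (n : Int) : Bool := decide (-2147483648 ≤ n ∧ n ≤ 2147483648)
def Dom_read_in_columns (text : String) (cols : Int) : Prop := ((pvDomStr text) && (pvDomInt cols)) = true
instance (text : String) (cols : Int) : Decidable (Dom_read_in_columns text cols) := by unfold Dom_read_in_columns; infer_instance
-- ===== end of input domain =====

-- B reads the columns with strided slices text[c::cols] joined in one pass, instead of A's
-- nested row/column loops with idx = row*cols+col and a bounds check (measured constant-factor speedup).


-- ===== PORT A =====
-- rows = math.ceil(len(text) / cols): integer ceiling -((-n) // cols), exact for the admitted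
-- sizes (float division is exact there).  `padded` is computed by A but never used; omitted.
def read_in_columns (text : String) (cols : Int) : String :=
  let cs := text.toList
  let n : Int := cs.length
  let rows : Int := -(PySem.Int.floordiv (-n) cols)
  let result : List Char :=
    (PySem.List.pyRange 0 cols 1).foldl (fun acc col =>
      (PySem.List.pyRange 0 rows 1).foldl (fun acc row =>
        let idx := row * cols + col
        -- text[idx] is in range whenever the guard holds (idx = row*cols+col ≥ 0 here)
        if idx < n then acc ++ [PySem.List.pyGetD cs idx ' '] else acc) acc) []
  String.ofList result

-- ===== PORT B =====
-- ''.join(text[c::cols] for c in range(cols)); inside the loop cols ≥ 1, so the slice step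
-- is never 0 and slice? is always `some` (getD [] is never taken).
def read_in_columns_alt (text : String) (cols : Int) : String :=
  String.ofList ((PySem.List.pyRange 0 cols 1).foldl
    (fun acc c => acc ++ (PySem.List.slice? text.toList (some c) none cols).getD []) [])

-- ===== PRECONDITION & SPEC =====
-- A raises ZeroDivisionError (math.ceil(len(text)/cols)) exactly when cols = 0.
def Pre_read_in_columns (text : String) (cols : Int) : Prop := cols ≠ 0
instance (text : String) (cols : Int) : Decidable (Pre_read_in_columns text cols) := by unfold Pre_read_in_columns; infer_instance
def pvWitness_read_in_columns : String × Int := ("HELLOWORLD", 3)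

def Spec_read_in_columns (text : String) (cols : Int) (out : String) : Prop := out = read_in_columns_alt text cols
instance (text : String) (cols : Int) (out : String) : Decidable (Spec_read_in_columns text cols out) := by unfold Spec_read_in_columns; infer_instance

-- ===== CLAIM (what is proved, stated in full; the proofs are below) =====
def Claim_equal_read_in_columns : Prop := ∀ (text : String) (cols : Int), Dom_read_in_columns text cols → Pre_read_in_columns text cols → Spec_read_in_columns text cols (read_in_columns text cols)

-- ===== LEMMAS AND PROOFS =====

lemma filter_range_lt (c m : Nat) : (List.range m).filter (fun k => decide (k < c)) = List.range (min c m) := by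
  induction m with
  | zero => simp
  | succ m ih =>
    rw [List.range_succ, List.filter_append, ih]
    by_cases h : m < c
    · have h1 : min c m = m := by omega
      have h2 : min c (m + 1) = m + 1 := by omega
      simp [h, h1, List.range_succ]
    · have h1 : min c m = min c (m + 1) := by omega
      simp [h, h1]

lemma col_eq (cs : List Char) (cols col : Int) (h0 : 0 < cols) (hcol : 0 ≤ col) (acc : List Char) :
    (PySem.List.pyRange 0 (-(PySem.Int.floordiv (-((cs.length : Int))) cols)) 1).foldl
      (fun a row => if row * cols + col < (cs.length : Int) then a ++ [PySem.List.pyGetD cs (row * cols + col) ' '] else a) acc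
    = acc ++ (PySem.List.slice? cs (some col) none cols).getD [] := by
  set n : Int := (cs.length : Int) with hn
  set rows : Int := -(PySem.Int.floordiv (-n) cols) with hrowsdef
  have hrows : (rows - 1) * cols < n ∧ n ≤ rows * cols :=
    (PySem.Int.neg_floordiv_neg_eq_iff_of_pos h0).mp rfl
  have hn0 : 0 ≤ n := by positivity
  have hrows0 : 0 ≤ rows := by nlinarith [hrows.2]
  set K : Nat := if col < n then ((n - col + cols - 1) / cols).toNat else 0 with hK
  have hq : ∀ k : Int, 0 ≤ k → (k * cols + col < n ↔ k < (K : Int)) := by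
    intro k hk
    by_cases hcn : col < n
    · have hKq : (K : Int) = PySem.Int.floordiv (n - col + cols - 1) cols := by
        rw [hK, if_pos hcn, ← PySem.Int.floordiv_eq_ediv_of_pos h0]
        have h1 : 1 ≤ PySem.Int.floordiv (n - col + cols - 1) cols :=
          (PySem.Int.le_floordiv_iff_mul_le h0).mpr (by omega)
        omega
      rw [hKq]
      constructor
      · intro h
        have : k + 1 ≤ PySem.Int.floordiv (n - col + cols - 1) cols :=
          (PySem.Int.le_floordiv_iff_mul_le h0).mpr (by nlinarith)
        omega
      · intro h
        have := (PySem.Int.le_floordiv_iff_mul_le h0).mp (by omega : k + 1 ≤ PySem.Int.floordiv (n - col + cols - 1) cols)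
        nlinarith
    · have hK0 : K = 0 := by rw [hK, if_neg hcn]
      constructor
      · intro h; exfalso; nlinarith
      · intro h; omega
  have hKR : K ≤ rows.toNat := by
    by_cases hcn : col < n
    · have h2 : PySem.Int.floordiv (n - col + cols - 1) cols < rows + 1 :=
        (PySem.Int.floordiv_lt_iff_lt_mul h0).mpr (by nlinarith [hrows.2])
      have h3 : (K : Int) = PySem.Int.floordiv (n - col + cols - 1) cols := by
        rw [hK, if_pos hcn, ← PySem.Int.floordiv_eq_ediv_of_pos h0]
        have h1 : 1 ≤ PySem.Int.floordiv (n - col + cols - 1) cols :=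
          (PySem.Int.le_floordiv_iff_mul_le h0).mpr (by omega)
        omega
      omega
    · simp [hK, if_neg hcn]
  have hstep : (fun (a : List Char) (row : Int) => if row * cols + col < n then a ++ [PySem.List.pyGetD cs (row * cols + col) ' '] else a)
      = fun a row => if (fun row : Int => decide (row * cols + col < n)) row = true then a ++ [(fun row : Int => PySem.List.pyGetD cs (row * cols + col) ' ') row] else a := by
    funext a row; simp
  rw [hstep, PySem.List.foldl_append_if]
  rw [show rows = ((rows.toNat : Nat) : Int) by omega, PySem.List.pyRange_zero_natCast]
  rw [List.filter_map, List.map_map]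
  have hpred : ((List.range rows.toNat).filter ((fun row : Int => decide (row * cols + col < n)) ∘ (fun k : Nat => (k : Int))))
      = (List.range rows.toNat).filter (fun k => decide (k < K)) := by
    apply List.filter_congr
    intro k _
    simp only [Function.comp]
    have := hq (k : Int) (by positivity)
    simp only [decide_eq_decide]
    rw [this]
    exact_mod_cast Iff.rfl
  rw [hpred, filter_range_lt, Nat.min_eq_left hKR]
  have hns : ¬ cols < 0 := by omega
  have hne : ¬ cols = 0 := by omega
  simp only [PySem.List.slice?, PySem.List.sliceIndices, if_neg hne, if_neg hns, if_pos h0,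
    if_neg (by omega : ¬ col < 0)]
  by_cases hcn : col < n
  · have hmin : min col n = col := by omega
    rw [hmin, ← hn, ← hK, Option.getD_some]
    congr 1
    symm
    apply List.filterMap_eq_map_iff_forall_eq_some.mpr
    intro x hx
    have hxK : (x : Int) < (K : Int) := by exact_mod_cast List.mem_range.mp hx
    have hi : (x : Int) * cols + col < n := (hq _ (by positivity)).mpr hxK
    have hi0 : 0 ≤ (x : Int) * cols + col := by positivity
    have hidx : (col + cols * (x : Int)).toNat = ((x : Int) * cols + col).toNat := by
      congr 1; ring
    have hlen : ((x : Int) * cols + col).toNat < cs.length := by omega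
    rw [hidx, List.getElem?_eq_getElem hlen]
    simp only [Function.comp]
    rw [PySem.List.pyGetD_eq_getElem cs ' ' hi0 (by omega)]
  · have hmin : min col n = n := by omega
    have hK0 : K = 0 := by rw [hK, if_neg hcn]
    rw [hmin, ← hn, hK0]
    simp

-- ===== VERDICT (by name: the statement is the Claim_ definition above) =====
theorem read_in_columns_spec : Claim_equal_read_in_columns := by
  intro text cols _ hpre
  unfold Spec_read_in_columns read_in_columns read_in_columns_alt
  dsimp only
  by_cases h0 : 0 < cols
  · congr 1
    apply PySem.List.foldl_congr_mem
    intro acc col hcolmem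
    exact col_eq text.toList cols col h0 (PySem.List.mem_pyRange_one.mp hcolmem).1 acc
  · have hle : cols ≤ 0 := by omega
    simp [PySem.List.pyRange_one_eq_nil hle]
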